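-- pv_equiv track=rewrite | github.com/rehans-Life/Data-Structures-And-Algorithms | queues/sumMinMax.py | sumMinMaxOfK
-- ===== SOURCE A (Python) =====
-- from collections import deque
--
-- def sumMinMaxOfK(arr,k):
--
--     # In this variable im going to accumulate the sum of min and max elements
--     # of each subarray of size k
--     result = 0
--
--     # A deque which is going to consist of the minimum element of each
--     # window in its start
--     minDeque = deque()
--
--     # A deque which is going to consist of the maximum element of each
--     # window in its start
--     maxDeque = deque()
--
--     # Pointers to maintain and slide our window of size k.
--     i,j = 0,0
--
--     n = len(arr)
--
--     while j < n:
--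
--         # We include our jth element in both the deques.
--
--         # While inserting the jth element in the minDeque i should remove
--         # all elements which are greater than it and are infront of it
--         # in thr deque cause they are never going to become our answers again
--         while len(minDeque) > 0 and minDeque[len(minDeque)-1] > arr[j]:
--             minDeque.pop()
--
--         minDeque.append(arr[j])
--
--         # While inserting the jth element in the maxDeque i should remove all
--         # elements which are lesser than it and are infront of it in the queue
--         # cause they are never going to become our maximum elements again for
--         # any subarray.
--         while len(maxDeque) > 0 and maxDeque[len(maxDeque)-1] < arr[j]:
--             maxDeque.pop()
--
--         maxDeque.append(arr[j])
--
--         # Until window size hits we keep incrementing j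
--         if j-i+1 < k:
--             j+=1
--         elif j-i+1 == k:
--             # When window size hits then basically the first element in minDeque
--             # in the minimum element of this window
--             # And the first element in our maxDeque in our maximum element of
--             # this window
--             # So we can find there sum and add it to our accumulator
--             result+=(maxDeque[0]+minDeque[0])
--
--             # Move the window.
--             # Before that i check if my ith element is in starting element
--             # of any of the deques if it is then we need to remove it from
--             # the deques or else it has already been removed by the max
--             # min elements in the window from the deque.
--
--             # The reason as to why i need to remove it is because its not going
--             # to be inside of any of my windows anymore.
--
--             if maxDeque[0] == arr[i]:
--                 maxDeque.popleft()
--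
--             if minDeque[0] == arr[i]:
--                 minDeque.popleft()
--
--             # Icrementing both index pointers to slide the window
--             i+=1
--             j+=1
--
--     return result
-- ===== SOURCE B (Python) =====
-- def sumMinMaxOfK(arr, k):
--     result = 0
--     for i in range(len(arr) - k + 1):
--         window = arr[i:i+k]
--         result += min(window) + max(window)
--     return result
-- ===== Notes on version B (the rewrite author's own statement) =====
-- stated objective: simpler
-- what changed: Replaces the two monotonic deques and the sliding two-pointer loop with a direct per-window scan: for each window start i, slice arr[i:i+k] and add min+max of the slice.
-- outside the precondition, e.g. on sumMinMaxOfK([], 0): A returns 0, B raises ValueError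
import Mathlib
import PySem

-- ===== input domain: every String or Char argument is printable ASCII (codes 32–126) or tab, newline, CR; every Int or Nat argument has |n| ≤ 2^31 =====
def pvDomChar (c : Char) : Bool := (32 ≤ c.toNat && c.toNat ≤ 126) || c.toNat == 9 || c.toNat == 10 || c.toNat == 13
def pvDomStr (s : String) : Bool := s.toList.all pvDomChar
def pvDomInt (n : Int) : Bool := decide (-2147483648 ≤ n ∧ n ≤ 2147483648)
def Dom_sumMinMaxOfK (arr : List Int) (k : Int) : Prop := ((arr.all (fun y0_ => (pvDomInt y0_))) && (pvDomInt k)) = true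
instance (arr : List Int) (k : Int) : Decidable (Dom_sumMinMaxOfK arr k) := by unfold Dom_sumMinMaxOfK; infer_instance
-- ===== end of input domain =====

-- B replaces A's two monotonic deques and sliding two-pointer loop by a direct per-window
-- scan (slice each window, add its min and max): simpler, not faster.


-- ===== PORT A =====
-- while len(minDeque) > 0 and minDeque[-1] > x: minDeque.pop()
def popGt (d : List Int) (x : Int) : List Int :=
  if d.isEmpty then d
  else if d.getLastD 0 > x then popGt d.dropLast x else d
termination_by d.length
decreasing_by
  rename_i hne hgt
  rw [Bool.not_eq_true, List.isEmpty_eq_false_iff, ← List.length_pos_iff] at hne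
  simp [List.length_dropLast]; omega

-- while len(maxDeque) > 0 and maxDeque[-1] < x: maxDeque.pop()
def popLt (d : List Int) (x : Int) : List Int :=
  if d.isEmpty then d
  else if d.getLastD 0 < x then popLt d.dropLast x else d
termination_by d.length
decreasing_by
  rename_i hne hgt
  rw [Bool.not_eq_true, List.isEmpty_eq_false_iff, ← List.length_pos_iff] at hne
  simp [List.length_dropLast]; omega

-- the 'while j < n' loop of A, state (i, j, minDeque, maxDeque, result); fuel makes it
-- total (for k ≤ 0 and arr ≠ [] the Python loop never terminates; excluded by Pre_)
def loopA (arr : List Int) (k : Int) (n : Nat) :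
    Nat → Nat → Nat → List Int → List Int → Int → Int
  | 0, _, _, _, _, result => result
  | fuel + 1, i, j, minD, maxD, result =>
    if j < n then
      let x := arr.getD j 0
      let minD' := popGt minD x ++ [x]
      let maxD' := popLt maxD x ++ [x]
      if ((j : Int) - (i : Int) + 1) < k then
        loopA arr k n fuel i (j + 1) minD' maxD' result
      else if ((j : Int) - (i : Int) + 1) = k then
        let result' := result + (maxD'.headD 0 + minD'.headD 0)
        let maxD'' := if maxD'.headD 0 = arr.getD i 0 then maxD'.tail else maxD'
        let minD'' := if minD'.headD 0 = arr.getD i 0 then minD'.tail else minD'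
        loopA arr k n fuel (i + 1) (j + 1) minD'' maxD'' result'
      else
        loopA arr k n fuel i j minD' maxD' result
    else result

def sumMinMaxOfK (arr : List Int) (k : Int) : Int :=
  loopA arr k arr.length (arr.length + 1) 0 0 [] [] 0

-- ===== PORT B =====
def sumMinMaxOfK_alt (arr : List Int) (k : Int) : Int :=
  (PySem.List.pyRange 0 ((arr.length : Int) - k + 1) 1).foldl
    (fun result i =>
      let window := PySem.List.slice arr (some i) (some (i + k))
      -- min(window)/max(window); the none case (empty window, only when k ≤ 0, outside Pre_)
      -- is where Python raises ValueError
      result + ((PySem.List.min? window (fun x => x)).getD 0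
                + (PySem.List.max? window (fun x => x)).getD 0))
    0

-- ===== PRECONDITION & SPEC =====
-- Pre_ excludes k ≤ 0: there A's while loop never terminates for any nonempty arr (A returns,
-- 0, only for arr = []), and B's naive scan raises ValueError on an empty window.
def Pre_sumMinMaxOfK (arr : List Int) (k : Int) : Prop := 1 ≤ k
instance (arr : List Int) (k : Int) : Decidable (Pre_sumMinMaxOfK arr k) := by
  unfold Pre_sumMinMaxOfK; infer_instance

def pvWitness_sumMinMaxOfK : List Int × Int := ([3, 1, 2], 2)

def Spec_sumMinMaxOfK (arr : List Int) (k : Int) (out : Int) : Prop := out = sumMinMaxOfK_alt arr k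
instance (arr : List Int) (k : Int) (out : Int) : Decidable (Spec_sumMinMaxOfK arr k out) := by
  unfold Spec_sumMinMaxOfK; infer_instance

-- ===== CLAIM (what is proved, stated in full; the proofs are below) =====
def Claim_equal_sumMinMaxOfK : Prop := ∀ (arr : List Int) (k : Int), Dom_sumMinMaxOfK arr k → Pre_sumMinMaxOfK arr k → Spec_sumMinMaxOfK arr k (sumMinMaxOfK arr k)

-- ===== LEMMAS AND PROOFS =====

-- arr[a:b] as drop/take: the window arr[a..b)
def win (arr : List Int) (a b : Nat) : List Int := (arr.drop a).take (b - a)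

-- min + max of the size-kN window starting at t (Option default 0 never reached on nonempty windows)
def winF (arr : List Int) (kN t : Nat) : Int :=
  (PySem.List.min? ((arr.drop t).take kN) (fun x => x)).getD 0
  + (PySem.List.max? ((arr.drop t).take kN) (fun x => x)).getD 0

-- sum of winF over the first i windows
def S (arr : List Int) (kN i : Nat) : Int := ((List.range i).map (winF arr kN)).sum

lemma S_succ (arr : List Int) (kN i : Nat) :
    S arr kN (i + 1) = S arr kN i + winF arr kN i := by
  simp [S, List.range_succ]

-- the sequence of suffix minima of a window: exactly what A's minDeque holds
def gmin : List Int → List Int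
  | [] => []
  | v :: w => if ∀ u ∈ w, v ≤ u then v :: gmin w else gmin w

def gmax : List Int → List Int
  | [] => []
  | v :: w => if ∀ u ∈ w, u ≤ v then v :: gmax w else gmax w

lemma popGt_nil (x : Int) : popGt [] x = [] := by
  rw [popGt.eq_def]
  simp

lemma popGt_concat_gt (t : List Int) (a x : Int) (h : x < a) :
    popGt (t ++ [a]) x = popGt t x := by
  rw [popGt.eq_def]
  simp [h, List.getLastD_concat, List.dropLast_concat]

lemma popGt_concat_le (t : List Int) (a x : Int) (h : ¬ x < a) :
    popGt (t ++ [a]) x = t ++ [a] := by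
  rw [popGt.eq_def]
  simp [h, List.getLastD_concat]

lemma popLt_nil (x : Int) : popLt [] x = [] := by
  rw [popLt.eq_def]
  simp

lemma popLt_concat_lt (t : List Int) (a x : Int) (h : a < x) :
    popLt (t ++ [a]) x = popLt t x := by
  rw [popLt.eq_def]
  simp [h, List.getLastD_concat, List.dropLast_concat]

lemma popLt_concat_ge (t : List Int) (a x : Int) (h : ¬ a < x) :
    popLt (t ++ [a]) x = t ++ [a] := by
  rw [popLt.eq_def]
  simp [h, List.getLastD_concat]

lemma popGt_cons (v x : Int) (t : List Int) (hv : v ≤ x) :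
    popGt (v :: t) x = v :: popGt t x := by
  induction t using List.reverseRecOn with
  | nil => rw [popGt.eq_def]; simp [not_lt.mpr hv, popGt_nil]
  | append_singleton t' a ih =>
    by_cases h : x < a
    · rw [show v :: (t' ++ [a]) = (v :: t') ++ [a] from rfl,
        popGt_concat_gt _ _ _ h, popGt_concat_gt _ _ _ h, ih]
    · rw [show v :: (t' ++ [a]) = (v :: t') ++ [a] from rfl,
        popGt_concat_le _ _ _ h, popGt_concat_le _ _ _ h]
      simp

lemma popGt_all_gt (t : List Int) (x : Int) (h : ∀ u ∈ t, x < u) :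
    popGt t x = [] := by
  induction t using List.reverseRecOn with
  | nil => exact popGt_nil x
  | append_singleton t' a ih =>
    rw [popGt_concat_gt _ _ _ (h a (by simp))]
    exact ih (fun u hu => h u (by simp [hu]))

lemma popLt_cons (v x : Int) (t : List Int) (hv : x ≤ v) :
    popLt (v :: t) x = v :: popLt t x := by
  induction t using List.reverseRecOn with
  | nil => rw [popLt.eq_def]; simp [not_lt.mpr hv, popLt_nil]
  | append_singleton t' a ih =>
    by_cases h : a < x
    · rw [show v :: (t' ++ [a]) = (v :: t') ++ [a] from rfl,
        popLt_concat_lt _ _ _ h, popLt_concat_lt _ _ _ h, ih]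
    · rw [show v :: (t' ++ [a]) = (v :: t') ++ [a] from rfl,
        popLt_concat_ge _ _ _ h, popLt_concat_ge _ _ _ h]
      simp

lemma popLt_all_lt (t : List Int) (x : Int) (h : ∀ u ∈ t, u < x) :
    popLt t x = [] := by
  induction t using List.reverseRecOn with
  | nil => exact popLt_nil x
  | append_singleton t' a ih =>
    rw [popLt_concat_lt _ _ _ (h a (by simp))]
    exact ih (fun u hu => h u (by simp [hu]))

lemma gmin_subset (w : List Int) : ∀ u ∈ gmin w, u ∈ w := by
  induction w with
  | nil => simp [gmin]
  | cons v w' ih =>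
    intro u hu
    rw [gmin] at hu
    split at hu
    · rcases List.mem_cons.mp hu with h | h
      · simp [h]
      · exact List.mem_cons_of_mem _ (ih u h)
    · exact List.mem_cons_of_mem _ (ih u hu)

lemma gmin_head_spec (w : List Int) (hw : w ≠ []) :
    (gmin w).headD 0 ∈ w ∧ ∀ u ∈ w, (gmin w).headD 0 ≤ u := by
  induction w with
  | nil => exact absurd rfl hw
  | cons v w' ih =>
    rw [gmin]
    split_ifs with h
    · refine ⟨by simp, ?_⟩
      intro u hu
      rcases List.mem_cons.mp hu with h' | h'
      · simp [h']
      · simpa using h u h'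
    · have hw' : w' ≠ [] := by
        intro hnil
        exact h (by simp [hnil])
      obtain ⟨hmem, hle⟩ := ih hw'
      obtain ⟨u0, hu0, hu0v⟩ := by
        push_neg at h
        exact h
      refine ⟨List.mem_cons_of_mem _ hmem, ?_⟩
      intro u hu
      rcases List.mem_cons.mp hu with h' | h'
      · subst h'
        exact le_of_lt (lt_of_le_of_lt (hle u0 hu0) hu0v)
      · exact hle u h'

lemma gmax_subset (w : List Int) : ∀ u ∈ gmax w, u ∈ w := by
  induction w with
  | nil => simp [gmax]
  | cons v w' ih =>
    intro u hu
    rw [gmax] at hu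
    split at hu
    · rcases List.mem_cons.mp hu with h | h
      · simp [h]
      · exact List.mem_cons_of_mem _ (ih u h)
    · exact List.mem_cons_of_mem _ (ih u hu)

lemma gmax_head_spec (w : List Int) (hw : w ≠ []) :
    (gmax w).headD 0 ∈ w ∧ ∀ u ∈ w, u ≤ (gmax w).headD 0 := by
  induction w with
  | nil => exact absurd rfl hw
  | cons v w' ih =>
    rw [gmax]
    split_ifs with h
    · refine ⟨by simp, ?_⟩
      intro u hu
      rcases List.mem_cons.mp hu with h' | h'
      · simp [h']
      · simpa using h u h'
    · have hw' : w' ≠ [] := by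
        intro hnil
        exact h (by simp [hnil])
      obtain ⟨hmem, hle⟩ := ih hw'
      obtain ⟨u0, hu0, hu0v⟩ := by
        push_neg at h
        exact h
      refine ⟨List.mem_cons_of_mem _ hmem, ?_⟩
      intro u hu
      rcases List.mem_cons.mp hu with h' | h'
      · subst h'
        exact le_of_lt (lt_of_lt_of_le hu0v (hle u0 hu0))
      · exact hle u h'

-- pushing x: A pops the strictly greater tail and appends, which is exactly gmin of the grown window
lemma gmin_append (w : List Int) (x : Int) :
    gmin (w ++ [x]) = popGt (gmin w) x ++ [x] := by
  induction w with
  | nil => simp [gmin, popGt_nil]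
  | cons v w' ih =>
    rw [List.cons_append, gmin, gmin]
    by_cases h : ∀ u ∈ w' ++ [x], v ≤ u
    · rw [if_pos h, if_pos (fun u hu => h u (by simp [hu])), ih,
        popGt_cons _ _ _ (h x (by simp))]
      simp
    · rw [if_neg h]
      by_cases hw : ∀ u ∈ w', v ≤ u
      · have hxv : x < v := by
          push_neg at h
          obtain ⟨u0, hu0, hlt⟩ := h
          rcases List.mem_append.mp hu0 with h' | h'
          · exact absurd (hw u0 h') (not_le.mpr hlt)
          · simp at h'
            omega
        have h1 : popGt (gmin w') x = [] :=
          popGt_all_gt _ _ (fun u hu => lt_of_lt_of_le hxv (hw u (gmin_subset w' u hu)))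
        have h2 : popGt (v :: gmin w') x = [] := by
          apply popGt_all_gt
          intro u hu
          rcases List.mem_cons.mp hu with h' | h'
          · subst h'; exact hxv
          · exact lt_of_lt_of_le hxv (hw u (gmin_subset w' u h'))
        rw [if_pos hw, ih, h1, h2]
      · rw [if_neg hw, ih]

lemma gmax_append (w : List Int) (x : Int) :
    gmax (w ++ [x]) = popLt (gmax w) x ++ [x] := by
  induction w with
  | nil => simp [gmax, popLt_nil]
  | cons v w' ih =>
    rw [List.cons_append, gmax, gmax]
    by_cases h : ∀ u ∈ w' ++ [x], u ≤ v
    · rw [if_pos h, if_pos (fun u hu => h u (by simp [hu])), ih,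
        popLt_cons _ _ _ (h x (by simp))]
      simp
    · rw [if_neg h]
      by_cases hw : ∀ u ∈ w', u ≤ v
      · have hxv : v < x := by
          push_neg at h
          obtain ⟨u0, hu0, hlt⟩ := h
          rcases List.mem_append.mp hu0 with h' | h'
          · exact absurd (hw u0 h') (not_le.mpr hlt)
          · simp at h'
            omega
        have h1 : popLt (gmax w') x = [] :=
          popLt_all_lt _ _ (fun u hu => lt_of_le_of_lt (hw u (gmax_subset w' u hu)) hxv)
        have h2 : popLt (v :: gmax w') x = [] := by
          apply popLt_all_lt
          intro u hu
          rcases List.mem_cons.mp hu with h' | h'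
          · subst h'; exact hxv
          · exact lt_of_le_of_lt (hw u (gmax_subset w' u h')) hxv
        rw [if_pos hw, ih, h1, h2]
      · rw [if_neg hw, ih]

-- the head of the min deque is min(window)
lemma gmin_headD (w : List Int) (hw : w ≠ []) :
    (gmin w).headD 0 = (PySem.List.min? w (fun x => x)).getD 0 := by
  cases hm : PySem.List.min? w (fun x => x) with
  | none => exact absurd ((PySem.List.min?_eq_none_iff w _).mp hm) hw
  | some m =>
    obtain ⟨hmem, hle⟩ := gmin_head_spec w hw
    exact le_antisymm (hle m (PySem.List.min?_mem hm)) (PySem.List.min?_isMin hm _ hmem)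

lemma gmax_headD (w : List Int) (hw : w ≠ []) :
    (gmax w).headD 0 = (PySem.List.max? w (fun x => x)).getD 0 := by
  cases hm : PySem.List.max? w (fun x => x) with
  | none => exact absurd ((PySem.List.max?_eq_none_iff w _).mp hm) hw
  | some m =>
    obtain ⟨hmem, hle⟩ := gmax_head_spec w hw
    exact le_antisymm (PySem.List.max?_isMax hm _ hmem) (hle m (PySem.List.max?_mem hm))

-- sliding: A's conditional popleft of arr[i] shrinks the deque to the deque of the shrunk window
lemma gmin_slide (v : Int) (w : List Int) :
    (if (gmin (v :: w)).headD 0 = v then (gmin (v :: w)).tail else gmin (v :: w)) = gmin w := by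
  by_cases hc : ∀ u ∈ w, v ≤ u
  · rw [gmin, if_pos hc]
    simp
  · rw [gmin, if_neg hc]
    have hw' : w ≠ [] := by
      intro hnil
      exact hc (by simp [hnil])
    obtain ⟨u0, hu0, hu0v⟩ : ∃ u ∈ w, u < v := by
      push_neg at hc
      exact hc
    obtain ⟨hmem, hle⟩ := gmin_head_spec w hw'
    have hne : (gmin w).headD 0 ≠ v := by
      intro heq
      have := hle u0 hu0
      omega
    rw [if_neg hne]

lemma gmax_slide (v : Int) (w : List Int) :
    (if (gmax (v :: w)).headD 0 = v then (gmax (v :: w)).tail else gmax (v :: w)) = gmax w := by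
  by_cases hc : ∀ u ∈ w, u ≤ v
  · rw [gmax, if_pos hc]
    simp
  · rw [gmax, if_neg hc]
    have hw' : w ≠ [] := by
      intro hnil
      exact hc (by simp [hnil])
    obtain ⟨u0, hu0, hu0v⟩ : ∃ u ∈ w, v < u := by
      push_neg at hc
      exact hc
    obtain ⟨hmem, hle⟩ := gmax_head_spec w hw'
    have hne : (gmax w).headD 0 ≠ v := by
      intro heq
      have := hle u0 hu0
      omega
    rw [if_neg hne]

-- growing and shrinking the window
lemma win_succ (arr : List Int) (a j : Nat) (ha : a ≤ j) (hj : j < arr.length) :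
    win arr a (j + 1) = win arr a j ++ [arr.getD j 0] := by
  unfold win
  rw [show j + 1 - a = (j - a) + 1 from by omega, List.take_succ]
  congr 1
  rw [List.getElem?_drop, show a + (j - a) = j from by omega,
    List.getElem?_eq_getElem hj, List.getD_eq_getElem arr 0 hj]
  rfl

lemma win_cons (arr : List Int) (i j : Nat) (hi : i < arr.length) (hij : i ≤ j) :
    win arr i (j + 1) = arr.getD i 0 :: win arr (i + 1) (j + 1) := by
  unfold win
  rw [List.drop_eq_getElem_cons hi,
    show j + 1 - i = (j + 1 - (i + 1)) + 1 from by omega, List.take_succ_cons,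
    List.getD_eq_getElem arr 0 hi]

lemma win_ne_nil (arr : List Int) (a b : Nat) (hab : a < b) (hb : b ≤ arr.length) :
    win arr a b ≠ [] := by
  unfold win
  intro h
  have := congrArg List.length h
  simp [List.length_take, List.length_drop] at this
  omega

-- B unrolled: a sum of winF over all window starts
lemma alt_eq_S (arr : List Int) (k : Int) (hk : 1 ≤ k) :
    sumMinMaxOfK_alt arr k = S arr k.toNat ((arr.length : Int) - k + 1).toNat := by
  have hkt : (k.toNat : Int) = k := Int.toNat_of_nonneg (by omega)
  unfold sumMinMaxOfK_alt S
  rw [PySem.List.pyRange_one, List.foldl_map, PySem.List.foldl_add]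
  simp only [zero_add, sub_zero]
  congr 1
  apply List.map_congr_left
  intro t ht
  rw [← hkt, PySem.List.slice_natCast_add]
  simp only [winF, Int.toNat_natCast]

-- the main loop invariant of A: at the top of iteration j the deques hold the suffix
-- minima/maxima of arr[i..j) with i = j - (k-1), and result sums the first i windows
lemma loopA_run (arr : List Int) (k : Int) (hk : 1 ≤ k) :
    ∀ (fuel j : Nat), j ≤ arr.length → arr.length - j < fuel →
      loopA arr k arr.length fuel (j - (k.toNat - 1)) j
        (gmin (win arr (j - (k.toNat - 1)) j)) (gmax (win arr (j - (k.toNat - 1)) j))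
        (S arr k.toNat (j - (k.toNat - 1)))
      = S arr k.toNat (arr.length + 1 - k.toNat) := by
  have hkt : (k.toNat : Int) = k := Int.toNat_of_nonneg (by omega)
  have hk1 : 1 ≤ k.toNat := by omega
  intro fuel
  induction fuel with
  | zero => intro j hj hf; omega
  | succ fuel ih =>
    intro j hj hf
    by_cases hjn : j < arr.length
    · set kN := k.toNat with hkN
      set i := j - (kN - 1) with hi
      have hij : i ≤ j := by omega
      have hwin : win arr i (j + 1) = win arr i j ++ [arr.getD j 0] := win_succ arr i j hij hjn
      simp only [loopA]
      rw [if_pos hjn]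
      by_cases hlt : ((j : Int) - (i : Int) + 1) < k
      · have hnext : (j + 1) - (kN - 1) = i := by omega
        rw [if_pos hlt, ← gmin_append, ← gmax_append, ← hwin]
        have h2 := ih (j + 1) (by omega) (by omega)
        rw [hnext] at h2
        exact h2
      · by_cases heq : ((j : Int) - (i : Int) + 1) = k
        · have hiln : i < arr.length := by omega
          have hcons : win arr i (j + 1) = arr.getD i 0 :: win arr (i + 1) (j + 1) :=
            win_cons arr i j hiln hij
          have hne : win arr i (j + 1) ≠ [] := win_ne_nil arr i (j + 1) (by omega) (by omega)
          have hnext : (j + 1) - (kN - 1) = i + 1 := by omega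
          rw [if_neg hlt, if_pos heq, ← gmin_append, ← gmax_append, ← hwin]
          have hres : S arr kN i
              + ((gmax (win arr i (j + 1))).headD 0 + (gmin (win arr i (j + 1))).headD 0)
              = S arr kN (i + 1) := by
            rw [S_succ, gmin_headD _ hne, gmax_headD _ hne,
              show win arr i (j + 1) = (arr.drop i).take kN from by unfold win; congr 1; omega,
              winF]
            ring
          rw [hcons, gmin_slide, gmax_slide, ← hcons, hres]
          have h2 := ih (j + 1) (by omega) (by omega)
          rw [hnext] at h2
          exact h2
        · exfalso
          omega
    · simp only [loopA]
      rw [if_neg hjn]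
      congr 1
      omega

-- ===== VERDICT (by name: the statement is the Claim_ definition above) =====
theorem sumMinMaxOfK_spec : Claim_equal_sumMinMaxOfK := by
  intro arr k _ hk
  unfold Spec_sumMinMaxOfK
  have hk1 : 1 ≤ k := hk
  have hkt : (k.toNat : Int) = k := Int.toNat_of_nonneg (by omega)
  have h0 := loopA_run arr k hk1 (arr.length + 1) 0 (by omega) (by omega)
  rw [show (0 : Nat) - (k.toNat - 1) = 0 from by omega] at h0
  rw [show win arr 0 0 = [] from by simp [win]] at h0
  rw [show gmin [] = [] from rfl, show gmax [] = [] from rfl] at h0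
  rw [show S arr k.toNat 0 = 0 from by simp [S]] at h0
  rw [sumMinMaxOfK, h0, alt_eq_S arr k hk1]
  congr 1
  omega
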